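-- pv_equiv track=rewrite | github.com/farisali522/sentimenapp_20241310055 | labeling_simple.py | npm_20241310055_lexicon_label
-- ===== SOURCE A (Python) =====
-- def npm_20241310055_lexicon_label(text):
--     """
--     Labeling berdasarkan kamus kata sederhana.
--     Sangat cepat, tapi tidak seakurat Llama 3.
--     """
--     text_lower = str(text).lower()
--
--     # Kamus Kata Positif (Diperkaya)
--     pos_words = [
--         'bagus', 'keren', 'mantap', 'setuju', 'hebat', 'pintar', 'cerdas',
--         'solutif', 'tegas', 'menang', 'lanjutkan', 'terbaik', 'dukung',
--         'wow', 'rapi', 'jelas', 'berani', 'paten', 'gemoy', 'semangat',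
--         'juara', 'all in', '01', '02', '03', 'bismillah', 'alhamdulillah',
--         'berwibawa', 'bijaksana', 'visioner', 'memuaskan', 'masuk akal',
--         'logis', 'data', 'fakta', 'santun', 'tenang', 'menguasai',
--         'pro rakyat', 'amanah', 'jujur', 'menyala', 'idola', 'panutan',
--         'respect', 'salut', 'bangga', 'sukses', 'menang telak', 'kualitas',
--         'terbukti', 'nyata', 'sayang', 'cinta', 'love', 'gass', 'oke', 'sip',
--         'top', 'jos', 'pasti', 'yakin', 'masuk', 'percaya', 'gas', 'sah',
--         'amin', 'aamiin', 'doa', 'semoga', 'merakyat', 'tulus', 'ikhlas'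
--     ]
--
--     # Kamus Kata Negatif (Diperkaya + Toxic Words + Slang)
--     neg_words = [
--         'jelek', 'kecewa', 'bodoh', 'lemah', 'kalah', 'bohong', 'omong kosong',
--         'emosi', 'tidak setuju', 'hancur', 'mundur', 'takut', 'payah',
--         'gagal', 'bingung', 'licik', 'curang', 'malas', 'benci', 'muak',
--         'nangis', 'bacot', 'tolol', 'dungu', 'hoax', 'kasar', 'tidak sopan',
--         'omon', 'omon-omon', 'baper', 'blunder', 'ngawur', 'fitnah',
--         'drama', 'pencitraan', 'munafik', 'korup', 'dinasti', 'halu',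
--         'tidak jelas', 'muter-muter', 'omdo', 'janji palsu', 'parah', 'badut',
--         'emosian', 'provokasi', 'menyerang', 'sombong', 'angkuh', 'zalim',
--         'tai', 'anjing', 'bangsat', 'kampret', 'sialan', 'goblok', 'idiot',
--         'gila', 'mampus', 'sampah', 'setan', 'iblis', 'najis', 'jijik',
--         'aneh', 'kacau', 'suram', 'hadeuh', 'gajelas', 'rosak', 'sebel',
--         'rusak', 'ancur', 'hancur'
--     ]
--
--     score = 0
--     for w in pos_words:
--         if w in text_lower: score += 1
--     for w in neg_words:
--         if w in text_lower: score -= 1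
--
--     if score > 0: return 'positif'
--     if score < 0: return 'negatif'
--     return 'netral'
-- ===== SOURCE B (Python) =====
-- def npm_20241310055_lexicon_label(text):
--     """Single left-to-right scan of the text with a first-character index of a
--     weighted lexicon, instead of one full substring scan per dictionary word."""
--     text_lower = str(text).lower()
--
--     POS = 'bagus|keren|mantap|setuju|hebat|pintar|cerdas|solutif|tegas|menang|lanjutkan|terbaik|dukung|wow|rapi|jelas|berani|paten|gemoy|semangat|juara|all in|01|02|03|bismillah|alhamdulillah|berwibawa|bijaksana|visioner|memuaskan|masuk akal|logis|data|fakta|santun|tenang|menguasai|pro rakyat|amanah|jujur|menyala|idola|panutan|respect|salut|bangga|sukses|menang telak|kualitas|terbukti|nyata|sayang|cinta|love|gass|oke|sip|top|jos|pasti|yakin|masuk|percaya|gas|sah|amin|aamiin|doa|semoga|merakyat|tulus|ikhlas'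
--     NEG = 'jelek|kecewa|bodoh|lemah|kalah|bohong|omong kosong|emosi|tidak setuju|hancur|mundur|takut|payah|gagal|bingung|licik|curang|malas|benci|muak|nangis|bacot|tolol|dungu|hoax|kasar|tidak sopan|omon|omon-omon|baper|blunder|ngawur|fitnah|drama|pencitraan|munafik|korup|dinasti|halu|tidak jelas|muter-muter|omdo|janji palsu|parah|badut|emosian|provokasi|menyerang|sombong|angkuh|zalim|tai|anjing|bangsat|kampret|sialan|goblok|idiot|gila|mampus|sampah|setan|iblis|najis|jijik|aneh|kacau|suram|hadeuh|gajelas|rosak|sebel|rusak|ancur|hancur'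
--     lexicon = [(w, 1) for w in POS.split('|')] + [(w, -1) for w in NEG.split('|')]
--
--     # first-character index of all lexicon words
--     buckets = {}
--     for w, _ in lexicon:
--         buckets[w[0]] = buckets.get(w[0], []) + [w]
--
--     # one pass over the text: at each position try only the words starting with that character
--     found = set()
--     for i, ch in enumerate(text_lower):
--         for w in buckets.get(ch, []):
--             if w not in found and text_lower[i:i + len(w)] == w:
--                 found.add(w)
--
--     # weighted sum over the lexicon (duplicates kept, as separate entries)
--     score = 0
--     for w, wt in lexicon:
--         if w in found:
--             score += wt
--
--     if score > 0: return 'positif'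
--     if score < 0: return 'negatif'
--     return 'netral'
-- ===== Notes on version B (the rewrite author's own statement) =====
-- stated objective: alternative
-- what changed: B makes a single left-to-right pass over the text, at each position trying only the words indexed by their first character and collecting matches into a set, then scores by one weighted fold over a (word, +1/-1) lexicon built by splitting two packed strings, instead of A's one full substring scan of the text per dictionary word over two hard-coded lists.
import Mathlib
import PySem

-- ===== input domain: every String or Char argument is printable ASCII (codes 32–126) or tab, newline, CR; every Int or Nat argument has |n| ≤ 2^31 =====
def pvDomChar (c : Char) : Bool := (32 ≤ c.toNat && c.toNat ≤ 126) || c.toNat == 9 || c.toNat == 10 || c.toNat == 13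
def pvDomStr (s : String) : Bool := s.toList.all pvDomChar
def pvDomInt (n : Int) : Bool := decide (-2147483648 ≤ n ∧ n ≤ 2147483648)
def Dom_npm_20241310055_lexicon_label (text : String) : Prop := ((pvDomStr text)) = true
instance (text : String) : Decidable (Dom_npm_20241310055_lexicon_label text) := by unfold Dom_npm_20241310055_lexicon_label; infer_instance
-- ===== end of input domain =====

-- B replaces A's 148 independent substring scans by a single left-to-right pass over the
-- text with a first-character index of a weighted lexicon (objective: alternative).

-- ===== PORT A =====
-- A-side word lists, verbatim from A's source
def pvPosWords : List String := [
  "bagus", "keren", "mantap", "setuju", "hebat", "pintar", "cerdas",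
  "solutif", "tegas", "menang", "lanjutkan", "terbaik", "dukung", "wow",
  "rapi", "jelas", "berani", "paten", "gemoy", "semangat", "juara", "all in",
  "01", "02", "03", "bismillah", "alhamdulillah", "berwibawa", "bijaksana",
  "visioner", "memuaskan", "masuk akal", "logis", "data", "fakta", "santun",
  "tenang", "menguasai", "pro rakyat", "amanah", "jujur", "menyala", "idola",
  "panutan", "respect", "salut", "bangga", "sukses", "menang telak",
  "kualitas", "terbukti", "nyata", "sayang", "cinta", "love", "gass", "oke",
  "sip", "top", "jos", "pasti", "yakin", "masuk", "percaya", "gas", "sah",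
  "amin", "aamiin", "doa", "semoga", "merakyat", "tulus", "ikhlas"]

def pvNegWords : List String := [
  "jelek", "kecewa", "bodoh", "lemah", "kalah", "bohong", "omong kosong",
  "emosi", "tidak setuju", "hancur", "mundur", "takut", "payah", "gagal",
  "bingung", "licik", "curang", "malas", "benci", "muak", "nangis", "bacot",
  "tolol", "dungu", "hoax", "kasar", "tidak sopan", "omon", "omon-omon",
  "baper", "blunder", "ngawur", "fitnah", "drama", "pencitraan", "munafik",
  "korup", "dinasti", "halu", "tidak jelas", "muter-muter", "omdo",
  "janji palsu", "parah", "badut", "emosian", "provokasi", "menyerang",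
  "sombong", "angkuh", "zalim", "tai", "anjing", "bangsat", "kampret",
  "sialan", "goblok", "idiot", "gila", "mampus", "sampah", "setan", "iblis",
  "najis", "jijik", "aneh", "kacau", "suram", "hadeuh", "gajelas", "rosak",
  "sebel", "rusak", "ancur", "hancur"]

def npm_20241310055_lexicon_label (text : String) : String :=
  let textLower := PySem.Str.lower text            -- str(text).lower(); str() is identity on str
  let score : Int :=
    pvPosWords.foldl (fun s w => if PySem.Str.isIn w textLower then s + 1 else s) 0
  let score :=
    pvNegWords.foldl (fun s w => if PySem.Str.isIn w textLower then s - 1 else s) score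
  if score > 0 then "positif" else if score < 0 then "negatif" else "netral"

-- ===== PORT B =====
-- B-side lexicon data: two packed '|'-separated strings, split at use
def pvPosPacked : String := "bagus|keren|mantap|setuju|hebat|pintar|cerdas|solutif|tegas|menang|lanjutkan|terbaik|dukung|wow|rapi|jelas|berani|paten|gemoy|semangat|juara|all in|01|02|03|bismillah|alhamdulillah|berwibawa|bijaksana|visioner|memuaskan|masuk akal|logis|data|fakta|santun|tenang|menguasai|pro rakyat|amanah|jujur|menyala|idola|panutan|respect|salut|bangga|sukses|menang telak|kualitas|terbukti|nyata|sayang|cinta|love|gass|oke|sip|top|jos|pasti|yakin|masuk|percaya|gas|sah|amin|aamiin|doa|semoga|merakyat|tulus|ikhlas"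

def pvNegPacked : String := "jelek|kecewa|bodoh|lemah|kalah|bohong|omong kosong|emosi|tidak setuju|hancur|mundur|takut|payah|gagal|bingung|licik|curang|malas|benci|muak|nangis|bacot|tolol|dungu|hoax|kasar|tidak sopan|omon|omon-omon|baper|blunder|ngawur|fitnah|drama|pencitraan|munafik|korup|dinasti|halu|tidak jelas|muter-muter|omdo|janji palsu|parah|badut|emosian|provokasi|menyerang|sombong|angkuh|zalim|tai|anjing|bangsat|kampret|sialan|goblok|idiot|gila|mampus|sampah|setan|iblis|najis|jijik|aneh|kacau|suram|hadeuh|gajelas|rosak|sebel|rusak|ancur|hancur"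

-- lexicon = [(w, 1) for w in POS.split('|')] + [(w, -1) for w in NEG.split('|')]
-- s.split('|') with the nonempty separator, exact: PySem.Chars.splitOn over the code points
def pvSplitBar (s : String) : List String :=
  (PySem.Chars.splitOn s.toList "|".toList).map String.ofList

def pvLexicon : List (String × Int) :=
  (pvSplitBar pvPosPacked).map (fun w => (w, 1))
    ++ (pvSplitBar pvNegPacked).map (fun w => (w, -1))

def pvHead (w : String) : Char := w.toList.headD ' '        -- w[0]; every lexicon word is nonempty

-- buckets[w[0]] = buckets.get(w[0], []) + [w]
def pvBuckets : PySem.Dict Char (List String) :=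
  pvLexicon.foldl (fun d p => d.insert (pvHead p.1) (d.getD (pvHead p.1) [] ++ [p.1])) PySem.Dict.empty

-- text_lower[i:i+len(w)] == w
def pvMatch (cs : List Char) (i : Int) (w : String) : Bool :=
  PySem.List.slice cs (some i) (some (i + (w.toList.length : Int))) == w.toList

-- for i, ch in enumerate(text_lower): for w in buckets.get(ch, []): if w not in found and …: found.add(w)
def pvScan (cs : List Char) : PySem.Set String :=
  (PySem.List.enumerate cs 0).foldl (fun f p =>
    (pvBuckets.getD p.2 []).foldl (fun f w =>
      if !(PySem.Set.contains f w) && pvMatch cs p.1 w then PySem.Set.add f w else f) f)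
    PySem.Set.empty

def npm_20241310055_lexicon_label_alt (text : String) : String :=
  let found := pvScan (PySem.Str.lower text).toList
  -- weighted sum over the lexicon entries
  let score : Int :=
    pvLexicon.foldl (fun s p => if PySem.Set.contains found p.1 then s + p.2 else s) 0
  if score > 0 then "positif" else if score < 0 then "negatif" else "netral"

-- ===== PRECONDITION & SPEC =====
def Spec_npm_20241310055_lexicon_label (text : String) (out : String) : Prop := out = npm_20241310055_lexicon_label_alt text
instance (text : String) (out : String) : Decidable (Spec_npm_20241310055_lexicon_label text out) := by unfold Spec_npm_20241310055_lexicon_label; infer_instance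

-- ===== CLAIM (what is proved, stated in full; the proofs are below) =====
def Claim_equal_npm_20241310055_lexicon_label : Prop := ∀ (text : String), Dom_npm_20241310055_lexicon_label text → Spec_npm_20241310055_lexicon_label text (npm_20241310055_lexicon_label text)

-- ===== LEMMAS AND PROOFS =====

-- B's packed lexicon splits into exactly A's two word lists
set_option maxRecDepth 100000 in
set_option maxHeartbeats 4000000 in
lemma pvLexicon_eq : pvLexicon
    = pvPosWords.map (fun w => (w, (1 : Int))) ++ pvNegWords.map (fun w => (w, (-1 : Int))) := by decide

def pvAllWords : List String := pvPosWords ++ pvNegWords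

-- every lexicon word is nonempty and sits in the bucket of its first character
set_option maxRecDepth 100000 in
set_option maxHeartbeats 4000000 in
lemma pvWords_ok : ∀ w ∈ pvAllWords, w.toList ≠ [] ∧ w ∈ pvBuckets.getD (pvHead w) [] := by decide

-- the inner loop over one bucket adds exactly the bucket words matching at position i
lemma pvInner (cs : List Char) (i : Int) (bucket : List String) (f : PySem.Set String) (w : String) :
    (w ∈ bucket.foldl (fun f w =>
        if !(PySem.Set.contains f w) && pvMatch cs i w then PySem.Set.add f w else f) f)
    ↔ (w ∈ f ∨ (w ∈ bucket ∧ pvMatch cs i w = true)) := by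
  induction bucket generalizing f with
  | nil => simp
  | cons v rest ih =>
    simp only [List.foldl_cons, ih, List.mem_cons]
    by_cases hv : (!(PySem.Set.contains f v) && pvMatch cs i v) = true
    · rw [if_pos hv]
      simp only [Bool.and_eq_true] at hv
      rw [PySem.Set.mem_add]
      by_cases hw : w = v
      · subst hw; tauto
      · tauto
    · rw [if_neg hv]
      simp only [Bool.and_eq_true, Bool.not_eq_true', not_and] at hv
      by_cases hw : w = v
      · subst hw
        constructor
        · tauto
        · rintro (h | ⟨_, hm⟩)
          · exact Or.inl h
          · have hc : PySem.Set.contains f w = true := by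
              cases hcf : PySem.Set.contains f w
              · exact absurd hm (hv hcf)
              · rfl
            exact Or.inl ((PySem.Set.contains_iff f w).mp hc)
      · tauto

-- the whole scan collects exactly the bucketed words matching at some scanned position
lemma pvOuter (cs : List Char) (ps : List (Int × Char)) (f : PySem.Set String) (w : String) :
    (w ∈ ps.foldl (fun f p =>
        (pvBuckets.getD p.2 []).foldl (fun f w =>
          if !(PySem.Set.contains f w) && pvMatch cs p.1 w then PySem.Set.add f w else f) f) f)
    ↔ (w ∈ f ∨ ∃ p ∈ ps, w ∈ pvBuckets.getD p.2 [] ∧ pvMatch cs p.1 w = true) := by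
  induction ps generalizing f with
  | nil => simp
  | cons q rest ih =>
    simp only [List.foldl_cons, ih, pvInner, List.mem_cons]
    aesop

-- a lexicon word is in the scanned set iff it occurs as a substring
lemma pvScan_contains (cs : List Char) (w : String) (hw : w ∈ pvAllWords) :
    PySem.Set.contains (pvScan cs) w = PySem.Chars.isIn w.toList cs := by
  obtain ⟨hne, hbucket⟩ := pvWords_ok w hw
  rw [Bool.eq_iff_iff, PySem.Set.contains_iff]
  unfold pvScan
  rw [pvOuter]
  rw [← PySem.Chars.exists_prefix_drop_iff_isIn]
  constructor
  · rintro (h | ⟨p, hp, _, hm⟩)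
    · simp [PySem.Set.empty] at h
    · obtain ⟨k, hk, rfl⟩ := (PySem.List.mem_enumerate_iff cs 0 p).mp hp
      refine ⟨k, ?_⟩
      unfold pvMatch at hm
      rw [zero_add] at hm
      rw [PySem.List.slice_natCast_add, beq_iff_eq] at hm
      exact List.prefix_iff_eq_take.mpr hm.symm
  · rintro ⟨j, hpre⟩
    obtain ⟨rest, hrest⟩ := hpre
    have hj : j < cs.length := by
      by_contra h
      rw [List.drop_eq_nil_of_le (by omega)] at hrest
      exact hne (List.append_eq_nil_iff.mp hrest).1
    refine Or.inr ⟨((0 : Int) + (j : Int), cs[j]), ?_, ?_, ?_⟩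
    · exact (PySem.List.mem_enumerate_iff cs 0 _).mpr ⟨j, hj, rfl⟩
    · -- cs[j] is w's first character, so w lies in that bucket
      have hhead : cs[j] = pvHead w := by
        cases hwl : w.toList with
        | nil => exact absurd hwl hne
        | cons c t =>
          have h0 : (List.drop j cs)[0]? = some c := by
            rw [← hrest, hwl]; rfl
          rw [List.getElem?_drop, Nat.add_zero] at h0
          have : cs[j]? = some cs[j] := List.getElem?_eq_getElem hj
          rw [this] at h0
          simp only [pvHead, hwl, List.headD_cons]
          exact Option.some.inj h0
      rw [hhead]; exact hbucket
    · unfold pvMatch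
      rw [zero_add, PySem.List.slice_natCast_add, beq_iff_eq]
      exact (List.prefix_iff_eq_take.mp ⟨rest, hrest⟩).symm

-- B's single weighted fold over the lexicon equals A's two signed folds
lemma pvScore_eq (c : String → Bool) :
    pvLexicon.foldl (fun s p => if c p.1 then s + p.2 else s) (0 : Int)
      = pvNegWords.foldl (fun s w => if c w then s - 1 else s)
          (pvPosWords.foldl (fun s w => if c w then s + 1 else s) 0) := by
  rw [pvLexicon_eq, List.foldl_append, List.foldl_map, List.foldl_map]
  have h1 : (fun (s : Int) (w : String) => if c w then s + (-1 : Int) else s)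
      = (fun s w => if c w then s - 1 else s) := by
    funext s w; split_ifs <;> omega
  simp only [h1]

-- ===== VERDICT (by name: the statement is the Claim_ definition above) =====
theorem npm_20241310055_lexicon_label_spec : Claim_equal_npm_20241310055_lexicon_label := by
  intro text _
  unfold Spec_npm_20241310055_lexicon_label
  unfold npm_20241310055_lexicon_label npm_20241310055_lexicon_label_alt
  simp only []
  have key : ∀ w ∈ pvAllWords,
      PySem.Str.isIn w (PySem.Str.lower text)
        = PySem.Set.contains (pvScan (PySem.Str.lower text).toList) w := by
    intro w hw
    rw [pvScan_contains _ w hw, PySem.Str.isIn_eq]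
  rw [pvScore_eq]
  rw [PySem.List.foldl_congr_mem pvPosWords _ _ 0
        (fun acc w hw => by rw [key w (List.mem_append_left _ hw)]),
      PySem.List.foldl_congr_mem pvNegWords _ _ _
        (fun acc w hw => by rw [key w (List.mem_append_right _ hw)])]
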